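-- pv_equiv track=rewrite | github.com/Ninlives/relocatable.nix | max-path-len.py | get_unique_suffix_len
-- ===== SOURCE A (Python) =====
-- hash_len = 32
--
-- def get_suffix(string, suffix_len):
--     return string[-suffix_len:]
--
-- def get_unique_suffix_len(hashes):
--     slen = 1
--     for i in range(len(hashes)):
--         hash_ = hashes[i]
--         while get_suffix(hash_, slen) in map(lambda x: get_suffix(x, slen), hashes[:i]):
--             slen += 1
--             if slen == hash_len:
--                 return slen
--     return slen
-- ===== SOURCE B (Python) =====
-- def get_unique_suffix_len(hashes):
--     def distinct(s):
--         seen = set()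
--         for h in hashes:
--             suf = h[-s:]
--             if suf in seen:
--                 return False
--             seen.add(suf)
--         return True
--     lo, hi = 1, 32
--     while lo < hi:
--         mid = (lo + hi) // 2
--         if distinct(mid):
--             hi = mid
--         else:
--             lo = mid + 1
--     return lo
-- ===== Notes on version B (the rewrite author's own statement) =====
-- stated objective: alternative
-- what changed: Replaces A's incremental rescan of growing prefixes (bumping slen on each collision) by a binary search over the suffix length, checking uniqueness with a hash set in one pass per probe.
import Mathlib
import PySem

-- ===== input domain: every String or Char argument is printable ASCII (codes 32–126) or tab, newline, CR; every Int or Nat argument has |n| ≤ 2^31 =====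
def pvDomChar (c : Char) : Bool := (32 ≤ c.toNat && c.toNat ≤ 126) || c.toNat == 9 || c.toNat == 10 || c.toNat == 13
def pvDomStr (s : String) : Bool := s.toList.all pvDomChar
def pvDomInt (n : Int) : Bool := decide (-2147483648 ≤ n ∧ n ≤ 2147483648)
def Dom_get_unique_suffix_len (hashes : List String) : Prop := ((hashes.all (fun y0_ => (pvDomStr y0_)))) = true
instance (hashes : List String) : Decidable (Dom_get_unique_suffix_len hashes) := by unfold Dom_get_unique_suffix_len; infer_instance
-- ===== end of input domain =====

-- B replaces A's incremental prefix-rescanning loop by a binary search over the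
-- suffix length with a set-based uniqueness pass per probe (objective: alternative).

-- ===== PORT A =====
-- hash_len = 32
def hash_len : Nat := 32

-- get_suffix(string, suffix_len) = string[-suffix_len:]
def get_suffix (string : String) (suffix_len : Int) : String :=
  PySem.Str.slice string (some (-suffix_len)) none

-- the inner `while` loop; `.error 32` is the early `return slen` when slen hits hash_len.
-- fuel 32 is always enough: slen starts ≥ 1 and the loop exits at slen = 32.
def aWhile (done : List String) (hash_ : String) (slen : Nat) (fuel : Nat) : Except Nat Nat :=
  match fuel with
  | 0 => .ok slen
  | fuel + 1 =>
    if (done.map (fun x => get_suffix x (slen : Int))).contains (get_suffix hash_ (slen : Int)) then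
      if slen + 1 = hash_len then .error (slen + 1)
      else aWhile done hash_ (slen + 1) fuel
    else .ok slen

-- the `for i in range(len(hashes))` loop; `done` is hashes[:i], `pending` the rest.
def aFor (done pending : List String) (slen : Nat) : Nat :=
  match pending with
  | [] => slen
  | h :: rest =>
    match aWhile done h slen 32 with
    | .error r => r
    | .ok slen' => aFor (done ++ [h]) rest slen'

def get_unique_suffix_len (hashes : List String) : Int :=
  (aFor [] hashes 1 : Int)

-- ===== PORT B =====
-- distinct(s): one pass with a set of seen suffixes
def bDistinctLoop (hashes : List String) (s : Int) (seen : PySem.Set String) : Bool :=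
  match hashes with
  | [] => true
  | h :: rest =>
    let suf := PySem.Str.slice h (some (-s)) none
    if PySem.Set.contains seen suf then false
    else bDistinctLoop rest s (PySem.Set.add seen suf)

def bDistinct (hashes : List String) (s : Int) : Bool :=
  bDistinctLoop hashes s PySem.Set.empty

-- binary search over s ∈ [lo, hi); fuel 32 > hi - lo = 31 always suffices.
def bSearch (hashes : List String) (lo hi : Int) (fuel : Nat) : Int :=
  match fuel with
  | 0 => lo
  | fuel + 1 =>
    if lo < hi then
      let mid := PySem.Int.floordiv (lo + hi) 2
      if bDistinct hashes mid then bSearch hashes lo mid fuel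
      else bSearch hashes (mid + 1) hi fuel
    else lo

def get_unique_suffix_len_alt (hashes : List String) : Int :=
  bSearch hashes 1 32 32

-- ===== PRECONDITION & SPEC =====
def Spec_get_unique_suffix_len (hashes : List String) (out : Int) : Prop := out = get_unique_suffix_len_alt hashes
instance (hashes : List String) (out : Int) : Decidable (Spec_get_unique_suffix_len hashes out) := by unfold Spec_get_unique_suffix_len; infer_instance

-- ===== CLAIM (what is proved, stated in full; the proofs are below) =====
def Claim_equal_get_unique_suffix_len : Prop := ∀ (hashes : List String), Dom_get_unique_suffix_len hashes → Spec_get_unique_suffix_len hashes (get_unique_suffix_len hashes)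

-- ===== LEMMAS AND PROOFS =====

-- suffix of length k, on the character-list side
def sufL (k : Nat) (l : List Char) : List Char := l.drop (l.length - k)

-- the common suffix operation of both ports, with a Nat length
def sliceK (k : Nat) (x : String) : String :=
  PySem.Str.slice x (some (-(k : Int))) none

-- suffixes of length k of every string in l are pairwise distinct
def feasL (l : List String) (k : Nat) : Prop := (l.map (fun h => sufL k h.toList)).Nodup

lemma sliceK_toList (x : String) (k : Nat) (hk : 1 ≤ k) :
    (sliceK k x).toList = sufL k x.toList := by
  simp [sliceK, pysem, PySem.Str.slice]
  rw [PySem.List.slice_from_neg_natCast _ _ hk]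
  rfl

lemma get_suffix_eq_sliceK (x : String) (k : Nat) : get_suffix x (k : Int) = sliceK k x := rfl

lemma slice_eq_sliceK (x : String) (s : Int) (hs : 1 ≤ s) :
    PySem.Str.slice x (some (-s)) none = sliceK s.toNat x := by
  unfold sliceK
  rw [show -s = -((s.toNat : Int)) by omega]

lemma sliceK_eq_iff (x y : String) (k : Nat) (hk : 1 ≤ k) :
    sliceK k x = sliceK k y ↔ sufL k x.toList = sufL k y.toList := by
  constructor
  · intro e
    rw [← sliceK_toList x k hk, ← sliceK_toList y k hk, e]
  · intro e
    apply String.toList_injective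
    rw [sliceK_toList x k hk, sliceK_toList y k hk]
    exact e

lemma mem_map_sliceK (done : List String) (h : String) (k : Nat) (hk : 1 ≤ k) :
    (sliceK k h ∈ done.map (sliceK k)) ↔
      sufL k h.toList ∈ done.map (fun x => sufL k x.toList) := by
  simp only [List.mem_map]
  constructor
  · rintro ⟨a, ha, e⟩
    exact ⟨a, ha, (sliceK_eq_iff a h k hk).mp e⟩
  · rintro ⟨a, ha, e⟩
    exact ⟨a, ha, (sliceK_eq_iff a h k hk).mpr e⟩

lemma sufL_sufL (l : List Char) (k : Nat) : sufL k (sufL (k + 1) l) = sufL k l := by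
  simp [sufL, List.drop_drop]
  omega

lemma feasL_mono (l : List String) (k : Nat) (h : feasL l k) : feasL l (k + 1) := by
  unfold feasL at *
  have heq : l.map (fun h => sufL k h.toList)
      = (l.map (fun h => sufL (k + 1) h.toList)).map (sufL k) := by
    rw [List.map_map]
    exact List.map_congr_left (fun a _ => (sufL_sufL a.toList k).symm)
  rw [heq] at h
  exact h.of_map

lemma feasL_le (l : List String) {k m : Nat} (hkm : k ≤ m) (h : feasL l k) : feasL l m := by
  induction m with
  | zero => have : k = 0 := Nat.le_zero.mp hkm; subst this; exact h
  | succ n ih =>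
    rcases Nat.lt_or_ge k (n + 1) with hlt | hge
    · exact feasL_mono l n (ih (by omega))
    · have : k = n + 1 := by omega
      rwa [this] at h

lemma feasL_concat (done : List String) (h : String) (k : Nat) :
    feasL (done ++ [h]) k ↔
      feasL done k ∧ sufL k h.toList ∉ done.map (fun x => sufL k x.toList) := by
  simp [feasL, List.nodup_append]

lemma not_feasL_of_prefix (hashes done rest : List String) (h : String) (k : Nat)
    (hsplit : done ++ h :: rest = hashes) (hcol : ¬ feasL (done ++ [h]) k) :
    ¬ feasL hashes k := by
  intro hf
  apply hcol
  unfold feasL at hf ⊢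
  have hsub : (done ++ [h]).Sublist hashes := by
    rw [← hsplit, show done ++ h :: rest = (done ++ [h]) ++ rest by simp]
    exact List.sublist_append_left _ _
  exact List.Sublist.nodup (hsub.map (fun x => sufL k x.toList)) hf

-- characterization of the common result
def IsAns (hashes : List String) (r : Int) : Prop :=
  (r = 32 ∧ ∀ s : Nat, 1 ≤ s → s < 32 → ¬ feasL hashes s) ∨
  (∃ k : Nat, r = (k : Int) ∧ 1 ≤ k ∧ k < 32 ∧ feasL hashes k ∧
    ∀ s : Nat, 1 ≤ s → s < k → ¬ feasL hashes s)

lemma isAns_unique (hashes : List String) (r r' : Int)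
    (h : IsAns hashes r) (h' : IsAns hashes r') : r = r' := by
  rcases h with ⟨h32, hall⟩ | ⟨k, hk, hk1, hk32, hf, hmin⟩ <;>
    rcases h' with ⟨h32', hall'⟩ | ⟨k', hk', hk1', hk32', hf', hmin'⟩
  · rw [h32, h32']
  · exact absurd hf' (hall k' hk1' hk32')
  · exact absurd hf (hall' k hk1 hk32)
  · rcases Nat.lt_trichotomy k k' with hlt | heq | hgt
    · exact absurd hf (hmin' k hk1 hlt)
    · rw [hk, hk', heq]
    · exact absurd hf' (hmin k' hk1' hgt)

-- ===== A-side =====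

lemma aWhile_spec (hashes : List String) (done rest : List String) (h : String)
    (slen fuel : Nat) (hsplit : done ++ h :: rest = hashes)
    (h1 : 1 ≤ slen) (h2 : slen < 32) (hfuel : 32 - slen ≤ fuel)
    (hnd : feasL done slen)
    (hmin : ∀ s : Nat, 1 ≤ s → s < slen → ¬ feasL hashes s) :
    (aWhile done h slen fuel = .error 32 ∧ ∀ s : Nat, 1 ≤ s → s < 32 → ¬ feasL hashes s) ∨
    (∃ slen', aWhile done h slen fuel = .ok slen' ∧ 1 ≤ slen' ∧ slen' < 32 ∧
      feasL (done ++ [h]) slen' ∧ ∀ s : Nat, 1 ≤ s → s < slen' → ¬ feasL hashes s) := by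
  induction fuel generalizing slen with
  | zero => omega
  | succ fuel ih =>
    simp only [aWhile, get_suffix_eq_sliceK]
    by_cases hc : (done.map (fun x => sliceK slen x)).contains (sliceK slen h) = true
    · rw [if_pos hc]
      have hcol : sufL slen h.toList ∈ done.map (fun x => sufL slen x.toList) :=
        (mem_map_sliceK done h slen h1).mp (List.contains_iff_mem.mp hc)
      have hnf : ¬ feasL hashes slen := by
        apply not_feasL_of_prefix hashes done rest h slen hsplit
        intro hcat
        exact ((feasL_concat done h slen).mp hcat).2 hcol
      have hmin' : ∀ s : Nat, 1 ≤ s → s < slen + 1 → ¬ feasL hashes s := by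
        intro s hs1 hs2
        rcases Nat.lt_succ_iff_lt_or_eq.mp hs2 with hlt | heq
        · exact hmin s hs1 hlt
        · rw [heq]; exact hnf
      by_cases h32 : slen + 1 = hash_len
      · rw [if_pos h32]
        left
        refine ⟨by rw [h32]; rfl, fun s hs1 hs2 => hmin' s hs1 ?_⟩
        have : hash_len = 32 := rfl
        omega
      · rw [if_neg h32]
        have h2' : slen + 1 < 32 := by
          have : hash_len = 32 := rfl
          omega
        exact ih (slen + 1) (by omega) h2' (by omega) (feasL_mono done slen hnd) hmin'
    · rw [if_neg hc]
      right
      refine ⟨slen, rfl, h1, h2, ?_, hmin⟩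
      refine (feasL_concat done h slen).mpr ⟨hnd, fun hmem => ?_⟩
      exact hc (List.contains_iff_mem.mpr ((mem_map_sliceK done h slen h1).mpr hmem))

lemma aFor_spec (hashes : List String) (done pending : List String) (slen : Nat)
    (hsplit : done ++ pending = hashes)
    (h1 : 1 ≤ slen) (h2 : slen < 32)
    (hnd : feasL done slen)
    (hmin : ∀ s : Nat, 1 ≤ s → s < slen → ¬ feasL hashes s) :
    IsAns hashes ((aFor done pending slen : Nat) : Int) := by
  induction pending generalizing done slen with
  | nil =>
    right
    refine ⟨slen, rfl, h1, h2, ?_, hmin⟩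
    have : done = hashes := by simpa using hsplit
    rwa [this] at hnd
  | cons h rest ih =>
    simp only [aFor]
    rcases aWhile_spec hashes done rest h slen 32 hsplit h1 h2 (by omega) hnd hmin with
      ⟨he, hall⟩ | ⟨slen', hok, h1', h2', hnd', hmin'⟩
    · rw [he]
      left
      exact ⟨by norm_num, hall⟩
    · rw [hok]
      exact ih (done ++ [h]) slen' (by rw [← hsplit]; simp) h1' h2' hnd' hmin'

lemma a_isAns (hashes : List String) : IsAns hashes (get_unique_suffix_len hashes) := by
  unfold get_unique_suffix_len
  apply aFor_spec hashes [] hashes 1 rfl (by omega) (by omega)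
  · simp [feasL]
  · intro s hs1 hs2
    omega

-- ===== B-side =====

lemma bDistinctLoop_iff (l : List String) (s : Int) (hs : 1 ≤ s) (seen : PySem.Set String) :
    bDistinctLoop l s seen = true ↔
      ((l.map (fun x => sufL s.toNat x.toList)).Nodup ∧ ∀ x ∈ l, sliceK s.toNat x ∉ seen) := by
  induction l generalizing seen with
  | nil => simp [bDistinctLoop]
  | cons h rest ih =>
    have hk : 1 ≤ s.toNat := by omega
    simp only [bDistinctLoop, slice_eq_sliceK _ s hs]
    by_cases hc : PySem.Set.contains seen (sliceK s.toNat h) = true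
    · rw [if_pos hc]
      constructor
      · intro hft
        exact absurd hft (by simp)
      · rintro ⟨-, hall⟩
        exact absurd ((PySem.Set.contains_iff seen _).mp hc) (hall h (by simp))
    · rw [if_neg hc]
      rw [ih (PySem.Set.add seen (sliceK s.toNat h))]
      have hcm : sliceK s.toNat h ∉ seen := fun hm => hc ((PySem.Set.contains_iff seen _).mpr hm)
      constructor
      · rintro ⟨hnd, hall⟩
        refine ⟨List.nodup_cons.mpr ⟨fun hmem => ?_, hnd⟩, ?_⟩
        · rcases List.mem_map.mp ((mem_map_sliceK rest h s.toNat hk).mpr hmem) with ⟨a, ha, hae⟩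
          exact (hall a ha) ((PySem.Set.mem_add seen _ _).mpr (Or.inr hae))
        · intro x hx
          rcases List.mem_cons.mp hx with rfl | hx'
          · exact hcm
          · intro hmem
            exact (hall x hx') ((PySem.Set.mem_add seen _ _).mpr (Or.inl hmem))
      · rintro ⟨hnd, hall⟩
        have hnotin := (List.nodup_cons.mp hnd).1
        refine ⟨(List.nodup_cons.mp hnd).2, fun x hx hmem => ?_⟩
        rcases (PySem.Set.mem_add seen _ _).mp hmem with hin | heq
        · exact hall x (List.mem_cons_of_mem h hx) hin
        · have hmm : sufL s.toNat x.toList ∈ List.map (fun x => sufL s.toNat x.toList) rest :=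
            List.mem_map_of_mem hx
          rw [(sliceK_eq_iff x h s.toNat hk).mp heq] at hmm
          exact hnotin hmm

lemma bDistinct_iff (hashes : List String) (s : Int) (hs : 1 ≤ s) :
    bDistinct hashes s = true ↔ feasL hashes s.toNat := by
  unfold bDistinct feasL
  rw [bDistinctLoop_iff hashes s hs PySem.Set.empty]
  simp [PySem.Set.empty]

lemma bSearch_spec (hashes : List String) (lo hi : Int) (fuel : Nat)
    (h1 : 1 ≤ lo) (h2 : lo ≤ hi) (h3 : hi ≤ 32) (hfuel : (hi - lo).toNat < fuel)
    (hlo : ∀ s : Nat, 1 ≤ s → (s : Int) < lo → ¬ feasL hashes s)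
    (hhi : hi = 32 ∨ (hi < 32 ∧ feasL hashes hi.toNat)) :
    IsAns hashes (bSearch hashes lo hi fuel) := by
  induction fuel generalizing lo hi with
  | zero => omega
  | succ fuel ih =>
    simp only [bSearch]
    by_cases hlt : lo < hi
    · rw [if_pos hlt]
      have hmid := PySem.Int.floordiv_two_mid_bounds (le_of_lt hlt)
      have hmidlt : PySem.Int.floordiv (lo + hi) 2 < hi :=
        (PySem.Int.floordiv_lt_iff_lt_mul (by norm_num)).mpr (by omega)
      set mid := PySem.Int.floordiv (lo + hi) 2 with hmiddef
      have h1m : 1 ≤ mid := le_trans h1 hmid.1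
      by_cases hd : bDistinct hashes mid = true
      · rw [if_pos hd]
        exact ih lo mid h1 hmid.1 (by omega) (by omega) hlo
          (Or.inr ⟨by omega, (bDistinct_iff hashes mid h1m).mp hd⟩)
      · rw [if_neg hd]
        have hnf : ¬ feasL hashes mid.toNat :=
          fun hf => hd ((bDistinct_iff hashes mid h1m).mpr hf)
        refine ih (mid + 1) hi (by omega) (by omega) h3 (by omega) ?_ hhi
        intro t ht1 htlt hf
        by_cases hcase : (t : Int) < lo
        · exact hlo t ht1 hcase hf
        · exact hnf (feasL_le hashes (show t ≤ mid.toNat by omega) hf)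
    · rw [if_neg hlt]
      have heq : lo = hi := le_antisymm h2 (not_lt.mp hlt)
      rcases hhi with h32 | ⟨hlt32, hfeas⟩
      · left
        exact ⟨by omega, fun s hs1 hs32 => hlo s hs1 (by omega)⟩
      · right
        exact ⟨hi.toNat, by omega, by omega, by omega, hfeas,
          fun s hs1 hsk => hlo s hs1 (by omega)⟩

lemma b_isAns (hashes : List String) : IsAns hashes (get_unique_suffix_len_alt hashes) := by
  unfold get_unique_suffix_len_alt
  apply bSearch_spec hashes 1 32 32 (by omega) (by omega) (by omega) (by norm_num)
  · intro s hs1 hs2 _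
    omega
  · exact Or.inl rfl

-- ===== VERDICT (by name: the statement is the Claim_ definition above) =====
theorem get_unique_suffix_len_spec : Claim_equal_get_unique_suffix_len := by
  intro hashes _
  exact isAns_unique hashes _ _ (a_isAns hashes) (b_isAns hashes)
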